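-- pv_equiv track=rewrite | github.com/maatanyy/codingtest_study | PCCP/PCCP모의고사#1_3번_유전법칙_X.py | find
-- ===== SOURCE A (Python) =====
-- def find(pos, num):
--     stack = []
--
--     while pos>1:
--         stack.append(num%4)
--         pos-=1
--         num//=4
--
--     while len(stack) > 0:
--         ans = stack.pop()
--
--         if ans == 0:
--             return 'RR'
--         if ans ==3:
--             return 'rr'
--
--     return 'Rr'
-- ===== SOURCE B (Python) =====
-- def find(pos, num):
--     # Single LSB-first pass with a running answer: the last 0/3 digit seen
--     # (= the most significant one) wins; no stack, no reversal. Stops once the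
--     # quotient hits its fixpoint (0 -> all higher digits 0, -1 -> all 3).
--     k = pos - 1
--     ans = 'Rr'
--     q = num
--     i = 0
--     while i < k and q != 0 and q != -1:
--         d = q % 4
--         if d == 0:
--             ans = 'RR'
--         elif d == 3:
--             ans = 'rr'
--         q //= 4
--         i += 1
--     if i < k:
--         return 'RR' if q == 0 else 'rr'
--     return ans
-- ===== Notes on version B (the rewrite author's own statement) =====
-- stated objective: faster
-- what changed: B replaces A's two phases (build a digit stack, then pop/scan most-significant-first) with a single least-significant-first pass keeping a running answer (the last 0/3 digit seen, i.e. the most significant, wins) and short-circuits once the quotient reaches its fixpoint 0/-1, so cost is O(min(pos, log|num|)).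
import Mathlib
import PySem

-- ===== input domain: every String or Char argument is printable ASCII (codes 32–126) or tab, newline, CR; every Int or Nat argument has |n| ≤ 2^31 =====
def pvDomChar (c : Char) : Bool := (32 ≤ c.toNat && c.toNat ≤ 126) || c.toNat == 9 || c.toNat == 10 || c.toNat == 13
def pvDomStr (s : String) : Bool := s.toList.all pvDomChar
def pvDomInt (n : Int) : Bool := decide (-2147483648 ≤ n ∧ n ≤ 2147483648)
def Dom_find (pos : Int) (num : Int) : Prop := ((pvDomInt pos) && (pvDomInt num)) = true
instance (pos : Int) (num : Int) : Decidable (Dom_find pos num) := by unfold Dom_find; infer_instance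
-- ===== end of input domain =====

-- B: one LSB-first pass with a running answer (last 0/3 digit wins) and a 0/-1
-- quotient short-circuit, instead of A's stack build + MSB-first scan; faster for large pos.

-- ===== PORT A =====
-- first while loop: runs pos-1 times (0 if pos <= 1); fuel = (pos-1).toNat.
-- The stack is kept top-first (push = cons), so pop = head in the second loop.
def findBuild : Nat → Int → List Int → List Int
  | 0, _, st => st
  | n + 1, num, st => findBuild n (PySem.Int.floordiv num 4) (PySem.Int.mod num 4 :: st)

-- second while loop: ans = stack.pop() = head of the top-first stack
def findScan : List Int → String
  | [] => "Rr"
  | a :: rest => if a = 0 then "RR" else if a = 3 then "rr" else findScan rest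

def find (pos : Int) (num : Int) : String :=
  findScan (findBuild (pos - 1).toNat num [])

-- ===== PORT B =====
-- Source B's while loop: fuel = remaining iterations (k - i); state = (q, ans).
-- 'if i < k' after the loop corresponds to fuel > 0 at a fixpoint exit.
def altGo : Nat → Int → String → String
  | 0, _, ans => ans
  | n + 1, q, ans =>
      if q = 0 then "RR"
      else if q = -1 then "rr"
      else
        altGo n (PySem.Int.floordiv q 4)
          (if PySem.Int.mod q 4 = 0 then "RR"
           else if PySem.Int.mod q 4 = 3 then "rr" else ans)

def find_alt (pos : Int) (num : Int) : String :=
  altGo (pos - 1).toNat num "Rr"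

-- ===== PRECONDITION & SPEC =====
def Spec_find (pos : Int) (num : Int) (out : String) : Prop := out = find_alt pos num
instance (pos : Int) (num : Int) (out : String) : Decidable (Spec_find pos num out) := by unfold Spec_find; infer_instance

-- ===== CLAIM (what is proved, stated in full; the proofs are below) =====
def Claim_equal_find : Prop := ∀ (pos : Int) (num : Int), Dom_find pos num → Spec_find pos num (find pos num)

-- ===== LEMMAS AND PROOFS =====

theorem findBuild_acc (n : Nat) : ∀ (q : Int) (st : List Int),
    findBuild n q st = findBuild n q [] ++ st := by
  induction n with
  | zero => intro q st; simp [findBuild]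
  | succ n ih =>
      intro q st
      simp only [findBuild]
      rw [ih _ (_ :: st), ih _ (_ :: [])]
      simp

theorem findBuild_zero (n : Nat) : findBuild n 0 [] = List.replicate n 0 := by
  induction n with
  | zero => simp [findBuild]
  | succ n ih =>
      simp only [findBuild]
      rw [findBuild_acc]
      have h1 : PySem.Int.mod 0 4 = 0 := by decide
      have h2 : PySem.Int.floordiv 0 4 = 0 := by decide
      rw [h1, h2, ih]
      exact List.replicate_succ'.symm

theorem findBuild_negone (n : Nat) : findBuild n (-1) [] = List.replicate n 3 := by
  induction n with
  | zero => simp [findBuild]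
  | succ n ih =>
      simp only [findBuild]
      rw [findBuild_acc]
      have h1 : PySem.Int.mod (-1) 4 = 3 := by decide
      have h2 : PySem.Int.floordiv (-1) 4 = -1 := by decide
      rw [h1, h2, ih]
      exact List.replicate_succ'.symm

theorem findScan_replicate_zero (n : Nat) : findScan (List.replicate (n + 1) 0) = "RR" := by
  simp [List.replicate_succ, findScan]

theorem findScan_replicate_three (n : Nat) : findScan (List.replicate (n + 1) 3) = "rr" := by
  simp [List.replicate_succ, findScan]

theorem findScan_append (l m : List Int) :
    findScan (l ++ m) = if findScan l = "Rr" then findScan m else findScan l := by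
  induction l with
  | nil => simp [findScan]
  | cons a rest ih =>
      simp only [List.cons_append, findScan]
      by_cases h0 : a = 0
      · simp [h0]
      · by_cases h3 : a = 3
        · simp [h3]
        · simp [h0, h3, ih]

-- main invariant: B's running-answer loop equals A's scan of the built stack,
-- with the carried answer used exactly when the scan finds no 0/3 digit.
theorem main_inv (n : Nat) : ∀ (q : Int) (ans : String),
    altGo n q ans =
      (if findScan (findBuild n q []) = "Rr" then ans
       else findScan (findBuild n q [])) := by
  induction n with
  | zero =>
      intro q ans
      simp [altGo, findBuild, findScan]
  | succ n ih =>
      intro q ans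
      by_cases h0 : q = 0
      · subst h0
        rw [findBuild_zero, findScan_replicate_zero]
        simp [altGo]
      · by_cases h1 : q = -1
        · subst h1
          rw [findBuild_negone, findScan_replicate_three]
          simp [altGo]
        · set q' := PySem.Int.floordiv q 4 with hq'
          set d := PySem.Int.mod q 4 with hd
          have hbuild : findBuild (n + 1) q [] = findBuild n q' [] ++ [d] := by
            simp only [findBuild]
            rw [findBuild_acc, ← hd, ← hq']
          have hgo : altGo (n + 1) q ans =
              altGo n q' (if d = 0 then "RR" else if d = 3 then "rr" else ans) := by
            simp only [altGo]
            rw [if_neg h0, if_neg h1]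
          rw [hgo, ih, hbuild, findScan_append]
          by_cases hrest : findScan (findBuild n q' []) = "Rr"
          · simp only [hrest, if_pos]
            by_cases hd0 : d = 0
            · simp [hd0, findScan]
            · by_cases hd3 : d = 3
              · simp [hd3, findScan]
              · simp [hd0, hd3, findScan]
          · simp [hrest]

-- ===== VERDICT (by name: the statement is the Claim_ definition above) =====
theorem find_spec : Claim_equal_find := by
  intro pos num _
  unfold Spec_find find find_alt
  rw [main_inv]
  split <;> simp_all
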